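-- pv_equiv track=rewrite | github.com/kazuhayase/study | python/SRMs/Single Round Match 679/ListeningSongs.py | listen
-- ===== SOURCE A (Python) =====
-- def listen(durations1, durations2, minutes, T):
--     limit = minutes * 60
--     durations1 = list(durations1)
--     durations2 = list(durations2)
--     durations1.sort()
--     durations2.sort()
--     total = 0
--     res=0
--
--     if len(durations1) < T or len(durations2) < T:
--         return -1
--
--     for t in range(T):
--         total += durations1[t] + durations2[t]
--         res +=2
--
--     if total > limit:
--         return -1
--
--     rest = durations1[T:] + durations2[T:]
--     rest.sort()
--
--     for r in rest:
--         total += r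
--         if total > limit:
--             return res
--         else:
--             res +=1
--
--     return res
-- ===== SOURCE B (Python) =====
-- def listen(durations1, durations2, minutes, T):
--     if len(durations1) < T or len(durations2) < T:
--         return -1
--     d1 = sorted(durations1)
--     d2 = sorted(durations2)
--     rem = minutes * 60 - sum(d1[:T]) - sum(d2[:T])
--     if rem < 0:
--         return -1
--     # two-pointer merge of the two sorted suffixes: no second sort needed
--     i, j, count = T, T, 2 * T
--     n1, n2 = len(d1), len(d2)
--     while i < n1 or j < n2:
--         if j >= n2 or (i < n1 and d1[i] <= d2[j]):
--             x = d1[i]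
--             i += 1
--         else:
--             x = d2[j]
--             j += 1
--         if x > rem:
--             break
--         rem -= x
--         count += 1
--     return count
-- ===== Notes on version B (the rewrite author's own statement) =====
-- stated objective: alternative
-- what changed: B never builds or sorts the combined rest list: it merges the two already-sorted suffixes with a two-pointer loop, consuming the remaining budget as it goes, and the mandatory phase's index loop is replaced by sums of slices with the count formed arithmetically as 2*T plus the merged-prefix count.
-- outside the precondition, e.g. on listen([3, 1], [2], 1, -1): A returns 2, B returns 3
import Mathlib
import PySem

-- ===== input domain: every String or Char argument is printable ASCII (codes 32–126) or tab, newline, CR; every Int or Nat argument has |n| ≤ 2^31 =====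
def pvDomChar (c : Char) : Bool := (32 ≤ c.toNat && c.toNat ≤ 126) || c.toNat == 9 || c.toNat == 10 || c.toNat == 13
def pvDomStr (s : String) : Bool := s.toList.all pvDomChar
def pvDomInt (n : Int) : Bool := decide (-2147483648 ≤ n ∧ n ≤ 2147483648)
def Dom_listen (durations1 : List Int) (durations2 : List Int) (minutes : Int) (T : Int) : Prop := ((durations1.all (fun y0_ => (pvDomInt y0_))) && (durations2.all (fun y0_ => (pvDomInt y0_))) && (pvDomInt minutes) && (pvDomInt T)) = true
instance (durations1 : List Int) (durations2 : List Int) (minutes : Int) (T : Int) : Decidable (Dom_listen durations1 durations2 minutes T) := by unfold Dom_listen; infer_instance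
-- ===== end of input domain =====

-- B replaces A's build-and-sort of the combined rest list by a two-pointer merge of the
-- two already-sorted suffixes that consumes the remaining budget as it goes, and the
-- mandatory index loop by sums of slices (alternative decomposition, same cost).

-- ===== PORT A =====
-- the 'for r in rest' loop with its early return
def listenLoopA (limit : Int) : List Int → Int → Int → Int
  | [], _, res => res
  | r :: rs, total, res =>
      if total + r > limit then res
      else listenLoopA limit rs (total + r) (res + 1)

def listen (durations1 : List Int) (durations2 : List Int) (minutes : Int) (T : Int) : Int :=
  let limit := minutes * 60
  let s1 := PySem.List.sorted durations1 (fun x => x) false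
  let s2 := PySem.List.sorted durations2 (fun x => x) false
  if (s1.length : Int) < T ∨ (s2.length : Int) < T then -1
  else
    let st := (PySem.List.pyRange 0 T 1).foldl
        (fun (st : Int × Int) t =>
          (st.1 + (PySem.List.pyGetD s1 t 0 + PySem.List.pyGetD s2 t 0), st.2 + 2)) (0, 0)
    if st.1 > limit then -1
    else
      let rest := PySem.List.sorted
        (PySem.List.slice s1 (some T) none ++ PySem.List.slice s2 (some T) none) (fun x => x) false
      listenLoopA limit rest st.1 st.2

-- ===== PORT B =====
-- Source B's two-pointer while loop: recursion over the two suffix lists with the same state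
-- (remaining budget, count); branch order as in Source B (left list wins ties).
def mergeCount : List Int → List Int → Int → Int → Int
  | [], [], _, count => count
  | [], y :: ys, rem, count =>
      if y > rem then count else mergeCount [] ys (rem - y) (count + 1)
  | x :: xs, [], rem, count =>
      if x > rem then count else mergeCount xs [] (rem - x) (count + 1)
  | x :: xs, y :: ys, rem, count =>
      if x ≤ y then
        (if x > rem then count else mergeCount xs (y :: ys) (rem - x) (count + 1))
      else
        (if y > rem then count else mergeCount (x :: xs) ys (rem - y) (count + 1))

def listen_alt (durations1 : List Int) (durations2 : List Int) (minutes : Int) (T : Int) : Int :=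
  if (durations1.length : Int) < T ∨ (durations2.length : Int) < T then -1
  else
    let d1 := PySem.List.sorted durations1 (fun x => x) false
    let d2 := PySem.List.sorted durations2 (fun x => x) false
    let rem := minutes * 60 - (PySem.List.slice d1 none (some T)).sum
                            - (PySem.List.slice d2 none (some T)).sum
    if rem < 0 then -1
    else
      mergeCount (PySem.List.slice d1 (some T) none) (PySem.List.slice d2 (some T) none)
        rem (2 * T)

-- ===== PRECONDITION & SPEC =====
-- Pre_ restricts to the natural domain T ≥ 0 (a song count): for negative T, A's value comes
-- from negative-slice wraparound and an empty range loop, outside the task's natural domain.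
def Pre_listen (durations1 : List Int) (durations2 : List Int) (minutes : Int) (T : Int) : Prop := 0 ≤ T
instance (durations1 : List Int) (durations2 : List Int) (minutes : Int) (T : Int) : Decidable (Pre_listen durations1 durations2 minutes T) := by unfold Pre_listen; infer_instance

def pvWitness_listen : List Int × List Int × Int × Int := ([3, 1, 5], [2, 4], 1, 2)

def Spec_listen (durations1 : List Int) (durations2 : List Int) (minutes : Int) (T : Int) (out : Int) : Prop := out = listen_alt durations1 durations2 minutes T
instance (durations1 : List Int) (durations2 : List Int) (minutes : Int) (T : Int) (out : Int) : Decidable (Spec_listen durations1 durations2 minutes T out) := by unfold Spec_listen; infer_instance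

-- ===== CLAIM (what is proved, stated in full; the proofs are below) =====
def Claim_equal_listen : Prop := ∀ (durations1 : List Int) (durations2 : List Int) (minutes : Int) (T : Int), Dom_listen durations1 durations2 minutes T → Pre_listen durations1 durations2 minutes T → Spec_listen durations1 durations2 minutes T (listen durations1 durations2 minutes T)

-- ===== LEMMAS AND PROOFS =====

-- length of the longest prefix of rs whose running sums stay within rem
def countFit : Int → List Int → Nat
  | _, [] => 0
  | rem, r :: rs => if rem < r then 0 else countFit (rem - r) rs + 1

theorem loopA_eq_countFit (limit : Int) :
    ∀ (rest : List Int) (total res : Int),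
      listenLoopA limit rest total res = res + (countFit (limit - total) rest : Int) := by
  intro rest
  induction rest with
  | nil => intro total res; simp [listenLoopA, countFit]
  | cons r rs ih =>
    intro total res
    simp only [listenLoopA, countFit]
    by_cases h : total + r > limit
    · rw [if_pos h, if_pos (by omega)]
      simp
    · rw [if_neg h, if_neg (by omega), ih]
      have : limit - (total + r) = limit - total - r := by ring
      rw [this]
      push_cast
      ring

-- B's two-pointer loop counts the fitting prefix of the merge of its two inputs
theorem mergeCount_eq_countFit :
    ∀ (xs ys : List Int) (rem count : Int),
      mergeCount xs ys rem count
        = count + (countFit rem (xs.merge ys (fun a b => decide (a ≤ b))) : Int) := by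
  intro xs ys rem count
  fun_induction mergeCount xs ys rem count with
  | case1 => simp [countFit]
  | case2 y ys rem count hgt =>
    simp only [List.nil_merge, countFit]
    rw [if_pos (by omega)]; simp
  | case3 y ys rem count hgt ih =>
    simp only [List.nil_merge, countFit]
    rw [if_neg (by omega)]
    simp only [List.nil_merge] at ih
    rw [ih]; push_cast; ring
  | case4 x xs rem count hgt =>
    simp only [List.merge_right, countFit]
    rw [if_pos (by omega)]; simp
  | case5 x xs rem count hgt ih =>
    simp only [List.merge_right, countFit]
    rw [if_neg (by omega)]
    simp only [List.merge_right] at ih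
    rw [ih]; push_cast; ring
  | case6 x xs y ys rem count hle hgt =>
    rw [List.cons_merge_cons, if_pos (by simpa using hle)]
    simp only [countFit]
    rw [if_pos (by omega)]; simp
  | case7 x xs y ys rem count hle hgt ih =>
    rw [List.cons_merge_cons, if_pos (by simpa using hle)]
    simp only [countFit]
    rw [if_neg (by omega), ih]; push_cast; ring
  | case8 x xs y ys rem count hle hgt =>
    rw [List.cons_merge_cons, if_neg (by simpa using hle)]
    simp only [countFit]
    rw [if_pos (by omega)]; simp
  | case9 x xs y ys rem count hle hgt ih =>
    rw [List.cons_merge_cons, if_neg (by simpa using hle)]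
    simp only [countFit]
    rw [if_neg (by omega), ih]; push_cast; ring

theorem mandatory_phase (s1 s2 : List Int) :
    ∀ (n : Nat), n ≤ s1.length → n ≤ s2.length →
      (PySem.List.pyRange 0 (n : Int) 1).foldl
        (fun (st : Int × Int) t =>
          (st.1 + (PySem.List.pyGetD s1 t 0 + PySem.List.pyGetD s2 t 0), st.2 + 2)) (0, 0)
      = ((s1.take n).sum + (s2.take n).sum, 2 * (n : Int)) := by
  intro n
  induction n with
  | zero => intro _ _; simp [PySem.List.pyRange_zero_nat]
  | succ m ih =>
    intro h1 h2
    have hm1 : m < s1.length := by omega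
    have hm2 : m < s2.length := by omega
    have hcast : ((m + 1 : Nat) : Int) = (m : Int) + 1 := by push_cast; ring
    rw [hcast, PySem.List.pyRange_one_succ_right (by positivity), List.foldl_append,
        ih (by omega) (by omega)]
    simp only [List.foldl_cons, List.foldl_nil]
    rw [PySem.List.pyGetD_natCast, PySem.List.pyGetD_natCast,
        List.sum_take_succ s1 m hm1, List.sum_take_succ s2 m hm2]
    rw [Prod.mk.injEq]
    refine ⟨?_, by push_cast; ring⟩
    simp [List.getD_eq_getElem?_getD, List.getElem?_eq_getElem, hm1, hm2]
    ring

-- sorting the concatenation of two sorted lists IS their (left-biased) merge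
theorem sorted_append_eq_merge (a b : List Int)
    (ha : a.Pairwise (· ≤ ·)) (hb : b.Pairwise (· ≤ ·)) :
    PySem.List.sorted (a ++ b) (fun x => x) false = a.merge b (fun x y => decide (x ≤ y)) := by
  apply PySem.List.sorted_id_eq_of_perm_of_pairwise
  · exact List.merge_perm_append _
  · exact List.Pairwise.merge ha hb

-- ===== VERDICT (by name: the statement is the Claim_ definition above) =====
theorem listen_spec : Claim_equal_listen := by
  intro d1 d2 minutes T _ hT
  have hT0 : (0:Int) ≤ T := hT
  unfold Spec_listen _root_.listen listen_alt
  simp only []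
  have hl1 : (PySem.List.sorted d1 (fun x => x) false).length = d1.length :=
    PySem.List.length_sorted _ _ _
  have hl2 : (PySem.List.sorted d2 (fun x => x) false).length = d2.length :=
    PySem.List.length_sorted _ _ _
  by_cases hg : (d1.length : Int) < T ∨ (d2.length : Int) < T
  · rw [if_pos (by rw [hl1, hl2]; exact hg), if_pos hg]
  · rw [if_neg (by rw [hl1, hl2]; exact hg), if_neg hg]
    push_neg at hg
    set s1 := PySem.List.sorted d1 (fun x => x) false with hs1
    set s2 := PySem.List.sorted d2 (fun x => x) false with hs2
    have hT1 : T.toNat ≤ s1.length := by rw [hl1]; omega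
    have hT2 : T.toNat ≤ s2.length := by rw [hl2]; omega
    have hTc : ((T.toNat : Nat) : Int) = T := Int.toNat_of_nonneg hT0
    have hmand := mandatory_phase s1 s2 T.toNat hT1 hT2
    rw [hTc] at hmand
    rw [hmand]
    rw [PySem.List.slice_to s1 hT0, PySem.List.slice_to s2 hT0]
    set tot := (s1.take T.toNat).sum + (s2.take T.toNat).sum with htot
    by_cases hlim : tot > minutes * 60
    · rw [if_pos hlim, if_pos (by omega)]
    · rw [if_neg hlim, if_neg (by omega)]
      rw [loopA_eq_countFit, mergeCount_eq_countFit]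
      rw [PySem.List.slice_from s1 hT0, PySem.List.slice_from s2 hT0]
      rw [sorted_append_eq_merge _ _
        ((PySem.List.sorted_pairwise d1 (fun x => x) |>.sublist (List.drop_sublist _ _)))
        ((PySem.List.sorted_pairwise d2 (fun x => x) |>.sublist (List.drop_sublist _ _)))]
      have hp1 : ((tot, 2 * T) : Int × Int).1 = tot := rfl
      have hp2 : ((tot, 2 * T) : Int × Int).2 = 2 * T := rfl
      rw [hp1, hp2]
      have hr : minutes * 60 - (s1.take T.toNat).sum - (s2.take T.toNat).sum
           = minutes * 60 - tot := by omega
      rw [hr]
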